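-- pv_equiv track=rewrite | github.com/patrickmarcel/SQLWL-segmentation | accord.py | creer_matrice2
-- ===== SOURCE A (Python) =====
-- def creer_matrice2(matrix):
--     matrice = [[0,0],[0,0]]
--     for i in range(len(matrix[0])):
--         if(matrix[0][i] == matrix[1][i]):
--             if(matrix[0][i] == 1):
--                 matrice[0][0] = matrice[0][0]+1
--             else:
--                 matrice[1][1] = matrice[1][1]+1
--         else:
--             if(matrix[0][i] == 1):
--                 matrice[0][1] = matrice[0][1]+1
--             else:
--                 matrice[1][0] = matrice[1][0]+1
--     return matrice
-- ===== SOURCE B (Python) =====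
-- def creer_matrice2(matrix):
--     # Stage 1: map each column to a 2x2 cell coordinate by arithmetic
--     # (row = 0 iff matrix[0][i] == 1; col = row if the rows agree, else 1-row).
--     # Stage 2: fill the matrix by counting each coordinate in that list.
--     coords = []
--     for i in range(len(matrix[0])):
--         r = 0 if matrix[0][i] == 1 else 1
--         c = r if matrix[0][i] == matrix[1][i] else 1 - r
--         coords.append((r, c))
--     return [[coords.count((r, c)) for c in range(2)] for r in range(2)]
-- ===== Notes on version B (the rewrite author's own statement) =====
-- stated objective: alternative
-- what changed: Instead of a four-way nested branch incrementing cells of a mutable 2x2 matrix in one pass, B first maps every column to a (row,col) coordinate computed arithmetically (row = 0 iff matrix[0][i]==1, col = row iff the rows agree else 1-row), then builds the matrix in a second stage by counting each of the four coordinates in that list.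
import Mathlib
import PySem

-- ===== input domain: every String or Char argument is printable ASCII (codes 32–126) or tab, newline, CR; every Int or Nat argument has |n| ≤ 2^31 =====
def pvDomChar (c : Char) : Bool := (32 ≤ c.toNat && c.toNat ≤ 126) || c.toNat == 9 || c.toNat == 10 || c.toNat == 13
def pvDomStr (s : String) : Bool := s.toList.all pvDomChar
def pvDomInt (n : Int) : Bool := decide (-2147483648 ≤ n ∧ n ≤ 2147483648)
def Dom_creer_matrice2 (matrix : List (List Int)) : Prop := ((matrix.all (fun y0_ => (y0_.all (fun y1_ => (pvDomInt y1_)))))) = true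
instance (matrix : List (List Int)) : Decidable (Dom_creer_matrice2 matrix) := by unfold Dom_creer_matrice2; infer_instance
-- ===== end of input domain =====

-- B maps each column to a (row,col) cell coordinate by arithmetic, then fills the 2x2
-- matrix in a second stage by counting each coordinate (alternative decomposition).

-- ===== PORT A =====
-- state (a,b,c,d) = (matrice[0][0], matrice[0][1], matrice[1][0], matrice[1][1])
def creer_matrice2 (matrix : List (List Int)) : List (List Int) :=
  let row0 : List Int := (PySem.List.pyGet? matrix 0).getD []
  let row1 : List Int := (PySem.List.pyGet? matrix 1).getD []
  let s := (PySem.List.pyRange 0 row0.length 1).foldl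
    (fun (s : Int × Int × Int × Int) i =>
      let x := (PySem.List.pyGet? row0 i).getD 0
      let y := (PySem.List.pyGet? row1 i).getD 0
      if x == y then
        if x == 1 then (s.1 + 1, s.2.1, s.2.2.1, s.2.2.2)
        else (s.1, s.2.1, s.2.2.1, s.2.2.2 + 1)
      else
        if x == 1 then (s.1, s.2.1 + 1, s.2.2.1, s.2.2.2)
        else (s.1, s.2.1, s.2.2.1 + 1, s.2.2.2)) (0, 0, 0, 0)
  [[s.1, s.2.1], [s.2.2.1, s.2.2.2]]

-- ===== PORT B =====
def creer_matrice2_alt (matrix : List (List Int)) : List (List Int) :=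
  let row0 : List Int := (PySem.List.pyGet? matrix 0).getD []
  let row1 : List Int := (PySem.List.pyGet? matrix 1).getD []
  -- stage 1: the coords list, built by the appending loop
  let coords := (PySem.List.pyRange 0 row0.length 1).foldl
    (fun (acc : List (Int × Int)) i =>
      let r : Int := if (PySem.List.pyGet? row0 i).getD 0 == 1 then 0 else 1
      let c : Int := if (PySem.List.pyGet? row0 i).getD 0 == (PySem.List.pyGet? row1 i).getD 0 then r else 1 - r
      acc ++ [(r, c)]) []
  -- stage 2: the nested comprehension counting each coordinate
  (PySem.List.pyRange 0 2 1).map (fun r =>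
    (PySem.List.pyRange 0 2 1).map (fun c => (PySem.List.count coords (r, c) : Int)))

-- ===== PRECONDITION & SPEC =====
-- Pre_ excludes exactly the inputs where the Python A raises IndexError:
-- an empty matrix, or a nonempty first row with no second row / a shorter second row.
def Pre_creer_matrice2 (matrix : List (List Int)) : Prop :=
  matrix ≠ [] ∧ (matrix.headI = [] ∨
    (2 ≤ matrix.length ∧ matrix.headI.length ≤ ((PySem.List.pyGet? matrix 1).getD []).length))
instance (matrix : List (List Int)) : Decidable (Pre_creer_matrice2 matrix) := by
  unfold Pre_creer_matrice2; infer_instance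

def pvWitness_creer_matrice2 : List (List Int) := [[1, 0, 1], [1, 1, 0]]

def Spec_creer_matrice2 (matrix : List (List Int)) (out : List (List Int)) : Prop := out = creer_matrice2_alt matrix
instance (matrix : List (List Int)) (out : List (List Int)) : Decidable (Spec_creer_matrice2 matrix out) := by unfold Spec_creer_matrice2; infer_instance

-- ===== CLAIM (what is proved, stated in full; the proofs are below) =====
def Claim_equal_creer_matrice2 : Prop := ∀ (matrix : List (List Int)), Dom_creer_matrice2 matrix → Pre_creer_matrice2 matrix → Spec_creer_matrice2 matrix (creer_matrice2 matrix)

-- ===== LEMMAS AND PROOFS =====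

-- the cell coordinate of column i
def pvCoord (row0 row1 : List Int) (i : Int) : Int × Int :=
  let r : Int := if (PySem.List.pyGet? row0 i).getD 0 == 1 then 0 else 1
  (r, if (PySem.List.pyGet? row0 i).getD 0 == (PySem.List.pyGet? row1 i).getD 0 then r else 1 - r)

-- classification of column i, and its translation to a 2x2 cell coordinate
def pvKey (row0 row1 : List Int) (i : Int) : Bool × Bool :=
  let x := (PySem.List.pyGet? row0 i).getD 0
  let y := (PySem.List.pyGet? row1 i).getD 0
  (x == 1, x == y)

def pvConv (p : Bool × Bool) : Int × Int :=
  if p.1 then (if p.2 then (0, 0) else (0, 1)) else (if p.2 then (1, 1) else (1, 0))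

lemma pvConv_inj : Function.Injective pvConv := by decide

-- B's coordinate arithmetic computes pvConv of the classification
lemma pvCoord_eq (row0 row1 : List Int) (i : Int) :
    pvCoord row0 row1 i = pvConv (pvKey row0 row1 i) := by
  unfold pvCoord pvKey pvConv
  by_cases hxy : ((PySem.List.pyGet? row0 i).getD 0 == (PySem.List.pyGet? row1 i).getD 0) = true <;>
    by_cases hx1 : ((PySem.List.pyGet? row0 i).getD 0 == (1 : Int)) = true <;>
      simp [hxy, hx1]

-- A's fold adds, to each state component, the count of the matching key among the indices
lemma foldA_count (row0 row1 : List Int) (l : List Int) (a b c d : Int) :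
    l.foldl
      (fun (s : Int × Int × Int × Int) i =>
        let x := (PySem.List.pyGet? row0 i).getD 0
        let y := (PySem.List.pyGet? row1 i).getD 0
        if x == y then
          if x == 1 then (s.1 + 1, s.2.1, s.2.2.1, s.2.2.2)
          else (s.1, s.2.1, s.2.2.1, s.2.2.2 + 1)
        else
          if x == 1 then (s.1, s.2.1 + 1, s.2.2.1, s.2.2.2)
          else (s.1, s.2.1, s.2.2.1 + 1, s.2.2.2)) (a, b, c, d)
    = (a + ((l.map (pvKey row0 row1)).count (true, true) : Int),
       b + ((l.map (pvKey row0 row1)).count (true, false) : Int),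
       c + ((l.map (pvKey row0 row1)).count (false, false) : Int),
       d + ((l.map (pvKey row0 row1)).count (false, true) : Int)) := by
  induction l generalizing a b c d with
  | nil => simp
  | cons h t ih =>
    simp only [List.foldl_cons, List.map_cons, List.count_cons]
    by_cases hxy : ((PySem.List.pyGet? row0 h).getD 0 == (PySem.List.pyGet? row1 h).getD 0) = true <;>
      by_cases hx1 : ((PySem.List.pyGet? row0 h).getD 0 == (1 : Int)) = true <;>
        simp only [hxy, hx1, pvKey, if_true, if_false, Bool.false_eq_true, ite_true, ite_false,
          Bool.not_eq_true] at * <;>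
        simp only [ih, hxy, hx1, Prod.mk.injEq, beq_self_eq_true, Bool.false_eq_true,
          if_true, if_false, ite_true, ite_false, List.count_cons] <;>
        refine ⟨by simp <;> omega, by simp <;> omega, by simp <;> omega, by simp <;> omega⟩

-- B's appending loop builds the map of pvCoord over the indices
lemma foldB_coords (row0 row1 : List Int) (l : List Int) (acc : List (Int × Int)) :
    l.foldl
      (fun (acc : List (Int × Int)) i =>
        let r : Int := if (PySem.List.pyGet? row0 i).getD 0 == 1 then 0 else 1
        let c : Int := if (PySem.List.pyGet? row0 i).getD 0 == (PySem.List.pyGet? row1 i).getD 0 then r else 1 - r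
        acc ++ [(r, c)]) acc
    = acc ++ l.map (pvCoord row0 row1) := by
  induction l generalizing acc with
  | nil => simp
  | cons h t ih =>
    simp only [List.foldl_cons]
    rw [ih]
    simp [pvCoord]

-- counting a coordinate in the coords list = counting its key among the indices
lemma count_coords (row0 row1 : List Int) (l : List Int) (k : Bool × Bool) :
    (l.map (pvCoord row0 row1)).count (pvConv k) = (l.map (pvKey row0 row1)).count k := by
  have : l.map (pvCoord row0 row1) = (l.map (pvKey row0 row1)).map pvConv := by
    simp [List.map_map, Function.comp_def, pvCoord_eq]
  rw [this, List.count_map_of_injective _ _ pvConv_inj]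

-- ===== VERDICT (by name: the statement is the Claim_ definition above) =====
theorem creer_matrice2_spec : Claim_equal_creer_matrice2 := by
  intro matrix _ _
  unfold Spec_creer_matrice2 creer_matrice2 creer_matrice2_alt
  simp only [foldA_count, foldB_coords, List.nil_append, zero_add]
  have h2 : PySem.List.pyRange 0 2 1 = [(0 : Int), 1] := by decide
  simp only [h2, List.map_cons, List.map_nil, PySem.List.count_eq]
  rw [show ((0:Int),(0:Int)) = pvConv (true, true) from rfl]
  rw [count_coords]
  rw [show ((0:Int),(1:Int)) = pvConv (true, false) from rfl]
  rw [count_coords]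
  rw [show ((1:Int),(0:Int)) = pvConv (false, false) from rfl]
  rw [count_coords]
  rw [show ((1:Int),(1:Int)) = pvConv (false, true) from rfl]
  rw [count_coords]
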